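-- pv_equiv track=rewrite | github.com/mmsaavedra1/Universidad | Laboratorios Intro a la Programacion/Semana 4/Encriptacion 1.py | cod_impares
-- ===== SOURCE A (Python) =====
-- def cod_impares(arg_numero):
--     # Numero codificado
--     numero_codificado = 0
--
--     # Se define la cantidad de cifras que tiene
--     contador = 10
--     cifras = 1
--     while arg_numero // contador != 0:
--         cifras += 1
--         contador *= 10
--
--     n = cifras  # ¡Si se quiere ocupar informacion que se itera se almacena en var auxiliares!
--
--     for i in range(1, cifras + 1):
--         # Se divide parte entera
--         cifra = arg_numero // (10 ** (n - i))
--         # Se ejecuta la operacion de cifrado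
--         resultado = n * cifra
--
--         # Condiciones de filtro
--         if (n - i + 1) % 2 == 0:
--             final = (cifra - 1) % 10
--         else:
--             final = (cifra + 1) % 10
--
--         # Se actualiza el numero
--         arg_numero = arg_numero % (10 ** (n - i))
--
--         # Finalmetne se suma al numero codificado
--         numero_codificado += (final) * (10 ** (n - i))
--
--     return numero_codificado * cifras
-- ===== SOURCE B (Python) =====
-- def cod_impares(arg_numero):
--     # One fused right-to-left pass: peel digits with % / //, encode by the
--     # parity of the position counted from the right, and count digits as we go.
--     temp = arg_numero
--     result = 0
--     place = 1
--     p = 1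
--     n = 0
--     while True:
--         d = temp % 10
--         if p % 2 == 1:
--             final = (d + 1) % 10
--         else:
--             final = (d - 1) % 10
--         result += final * place
--         place *= 10
--         p += 1
--         n += 1
--         temp //= 10
--         if temp == 0:
--             break
--     return result * n
-- ===== Notes on version B (the rewrite author's own statement) =====
-- stated objective: simpler
-- what changed: A counts digits in a first loop, then re-scans left-to-right computing a power of ten per step and reducing the number with mod each step; B is a single fused right-to-left pass that peels digits with mod and floor-division by ten, tracking place value, position parity and digit count in one loop.
import Mathlib
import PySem

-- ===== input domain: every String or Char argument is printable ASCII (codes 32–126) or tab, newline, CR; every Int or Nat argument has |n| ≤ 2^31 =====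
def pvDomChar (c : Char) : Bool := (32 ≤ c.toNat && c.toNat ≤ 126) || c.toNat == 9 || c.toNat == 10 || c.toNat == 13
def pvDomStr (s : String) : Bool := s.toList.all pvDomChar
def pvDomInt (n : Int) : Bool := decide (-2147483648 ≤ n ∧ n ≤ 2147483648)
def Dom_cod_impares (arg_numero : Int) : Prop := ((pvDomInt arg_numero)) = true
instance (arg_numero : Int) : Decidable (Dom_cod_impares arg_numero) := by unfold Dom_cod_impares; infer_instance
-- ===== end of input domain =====

-- B replaces A's count-then-left-to-right scan (one power of ten per step)
-- by one fused right-to-left digit loop; equality of return values proved for 0 ≤ n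
-- (both Pythons loop forever on negative input).

-- ===== PORT A =====
-- while arg_numero // contador != 0: cifras += 1; contador *= 10
-- (fuel only makes the recursion total; 64 ≥ number of iterations for every input in Dom)
def pvCountLoop (fuel : Nat) (numero contador cifras : Int) : Int :=
  match fuel with
  | 0 => cifras
  | fuel + 1 =>
    if PySem.Int.floordiv numero contador ≠ 0 then
      pvCountLoop fuel numero (contador * 10) (cifras + 1)
    else cifras

def cod_impares (arg_numero : Int) : Int :=
  let numero_codificado : Int := 0
  let cifras := pvCountLoop 64 arg_numero 10 1
  let n := cifras
  -- for i in range(1, cifras + 1): …  (state = (arg_numero, numero_codificado);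
  -- 'resultado = n * cifra' of the source is unused and dropped; inside the loop
  -- n - i ≥ 0, so 10 ** (n - i) is (10 : Int) ^ (n - i).toNat exactly)
  let st := (PySem.List.pyRange 1 (cifras + 1) 1).foldl
    (fun (st : Int × Int) (i : Int) =>
      let cifra := PySem.Int.floordiv st.1 ((10 : Int) ^ (n - i).toNat)
      let final := if PySem.Int.mod (n - i + 1) 2 = 0
                   then PySem.Int.mod (cifra - 1) 10
                   else PySem.Int.mod (cifra + 1) 10
      (PySem.Int.mod st.1 ((10 : Int) ^ (n - i).toNat),
       st.2 + final * (10 : Int) ^ (n - i).toNat))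
    (arg_numero, numero_codificado)
  st.2 * cifras

-- ===== PORT B =====
-- the do-while of Source B; state (temp, result, place, p, n); returns (result, n)
-- (fuel only makes the recursion total; 64 ≥ number of iterations for every input in Dom)
def pvLoopB (fuel : Nat) (temp result place p n : Int) : Int × Int :=
  match fuel with
  | 0 => (result, n)
  | fuel + 1 =>
    let d := PySem.Int.mod temp 10
    let final := if PySem.Int.mod p 2 = 1
                 then PySem.Int.mod (d + 1) 10
                 else PySem.Int.mod (d - 1) 10
    let result := result + final * place
    let temp' := PySem.Int.floordiv temp 10
    if temp' = 0 then (result, n + 1)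
    else pvLoopB fuel temp' result (place * 10) (p + 1) (n + 1)

def cod_impares_alt (arg_numero : Int) : Int :=
  let st := pvLoopB 64 arg_numero 0 1 1 0
  st.1 * st.2

-- ===== PRECONDITION & SPEC =====
-- A's digit-count loop never terminates for negative input (the floor quotient by any positive power of ten is minus one, never zero),
-- so Pre_ is exactly the non-negative ints.
def Pre_cod_impares (arg_numero : Int) : Prop := 0 ≤ arg_numero
instance (arg_numero : Int) : Decidable (Pre_cod_impares arg_numero) := by unfold Pre_cod_impares; infer_instance
def pvWitness_cod_impares : Int := (105)

def Spec_cod_impares (arg_numero : Int) (out : Int) : Prop := out = cod_impares_alt arg_numero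
instance (arg_numero : Int) (out : Int) : Decidable (Spec_cod_impares arg_numero out) := by unfold Spec_cod_impares; infer_instance

-- ===== CLAIM (what is proved, stated in full; the proofs are below) =====
def Claim_equal_cod_impares : Prop := ∀ (arg_numero : Int), Dom_cod_impares arg_numero → Pre_cod_impares arg_numero → Spec_cod_impares arg_numero (cod_impares arg_numero)


-- ===== LEMMAS AND PROOFS =====

-- cast helpers: floordiv/mod of a Nat cast by a power of ten
lemma pv_fd (m k : Nat) :
    PySem.Int.floordiv (m : Int) ((10 : Int) ^ k) = ((m / 10 ^ k : Nat) : Int) := by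
  rw [show ((10 : Int) ^ k) = ((10 ^ k : Nat) : Int) by push_cast; ring]
  exact PySem.Int.floordiv_natCast m (10 ^ k)

lemma pv_md (m k : Nat) :
    PySem.Int.mod (m : Int) ((10 : Int) ^ k) = ((m % 10 ^ k : Nat) : Int) := by
  rw [show ((10 : Int) ^ k) = ((10 ^ k : Nat) : Int) by push_cast; ring]
  exact PySem.Int.mod_natCast m (10 ^ k)

lemma pv_fd10 (m : Nat) :
    PySem.Int.floordiv (m : Int) 10 = ((m / 10 : Nat) : Int) := by
  rw [show (10 : Int) = ((10 : Nat) : Int) by norm_num]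
  exact PySem.Int.floordiv_natCast m 10

lemma pv_md10 (m : Nat) :
    PySem.Int.mod (m : Int) 10 = ((m % 10 : Nat) : Int) := by
  rw [show (10 : Int) = ((10 : Nat) : Int) by norm_num]
  exact PySem.Int.mod_natCast m 10

-- the number of decimal digits (1 for 0..9)
def pvDigits (m : Nat) : Nat :=
  if m < 10 then 1 else pvDigits (m / 10) + 1
termination_by m
decreasing_by exact Nat.div_lt_self (by omega) (by norm_num)

lemma pvDigits_small {m : Nat} (h : m < 10) : pvDigits m = 1 := by
  rw [pvDigits]; simp [h]

lemma pvDigits_large {m : Nat} (h : 10 ≤ m) : pvDigits m = pvDigits (m / 10) + 1 := by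
  rw [pvDigits]; simp [Nat.not_lt.2 h]

lemma pvDigits_pos (m : Nat) : 1 ≤ pvDigits m := by
  rw [pvDigits]; split <;> omega

lemma pvDigits_lt (m : Nat) : m < 10 ^ pvDigits m := by
  induction m using Nat.strong_induction_on with
  | _ m ih =>
    by_cases h : m < 10
    · rw [pvDigits_small h]; simpa using h
    · rw [pvDigits_large (Nat.not_lt.1 h)]
      have hlt := ih (m / 10) (Nat.div_lt_self (by omega) (by norm_num))
      have h2 := Nat.div_add_mod m 10
      have h3 := Nat.mod_lt m (show 0 < 10 by norm_num)
      rw [pow_succ]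
      omega

lemma pvDigits_le : ∀ (k m : Nat), m < 10 ^ (k + 1) → pvDigits m ≤ k + 1 := by
  intro k
  induction k with
  | zero => intro m h; rw [pvDigits_small (by simpa using h)]
  | succ k ih =>
    intro m h
    by_cases hm : m < 10
    · rw [pvDigits_small hm]; omega
    · rw [pvDigits_large (Nat.not_lt.1 hm)]
      have : m / 10 < 10 ^ (k + 1) := by
        rw [Nat.div_lt_iff_lt_mul (by norm_num : 0 < 10)]
        calc m < 10 ^ (k + 1 + 1) := h
        _ = 10 ^ (k + 1) * 10 := by ring
      exact Nat.succ_le_succ (ih _ this)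

-- the digit-encoding step: digit d at right-position parity p
def pvg (p d : Int) : Int :=
  if PySem.Int.mod p 2 = 1 then PySem.Int.mod (d + 1) 10 else PySem.Int.mod (d - 1) 10

lemma pvg_eq (p d : Int) :
    (if PySem.Int.mod p 2 = 0 then PySem.Int.mod (d - 1) 10 else PySem.Int.mod (d + 1) 10)
      = pvg p d := by
  unfold pvg
  rcases PySem.Int.mod_two_eq p with h | h
  · rw [if_pos h, if_neg (by rw [h]; norm_num)]
  · rw [if_neg (by rw [h]; norm_num), if_pos h]

-- the encoded value of the low n digit slots of m, rightmost slot at parity p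
def pvD : Nat → Int → Nat → Int
  | 0, _, _ => 0
  | n + 1, p, m =>
      pvg (p + (n : Int)) ((m / 10 ^ n : Nat) : Int) * (10 : Int) ^ n + pvD n p (m % 10 ^ n)

lemma pvD_peel : ∀ (n : Nat) (p : Int) (m : Nat), m < 10 ^ (n + 1) →
    pvD (n + 1) p m = pvg p ((m % 10 : Nat) : Int) + 10 * pvD n (p + 1) (m / 10) := by
  intro n
  induction n with
  | zero =>
    intro p m h
    simp [pvD, Nat.mod_eq_of_lt (by simpa using h)]
  | succ n ih =>
    intro p m h
    have hmod : m % 10 ^ (n + 1) < 10 ^ (n + 1) := Nat.mod_lt _ (by positivity)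
    have e1 : (m % 10 ^ (n + 1)) % 10 = m % 10 :=
      Nat.mod_mod_of_dvd m (dvd_pow_self 10 (by omega))
    have e2 : (m / 10) / 10 ^ n = m / 10 ^ (n + 1) := by
      rw [Nat.div_div_eq_div_mul, pow_succ']
    have e3 : (m % 10 ^ (n + 1)) / 10 = (m / 10) % 10 ^ n := by
      rw [pow_succ', Nat.mod_mul_right_div_self]
    calc pvD (n + 2) p m
        = pvg (p + (n + 1 : Nat)) ((m / 10 ^ (n + 1) : Nat) : Int) * (10 : Int) ^ (n + 1)
            + pvD (n + 1) p (m % 10 ^ (n + 1)) := rfl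
      _ = pvg (p + (n + 1 : Nat)) ((m / 10 ^ (n + 1) : Nat) : Int) * (10 : Int) ^ (n + 1)
            + (pvg p (((m % 10 ^ (n + 1)) % 10 : Nat) : Int)
               + 10 * pvD n (p + 1) ((m % 10 ^ (n + 1)) / 10)) := by rw [ih p _ hmod]
      _ = pvg p ((m % 10 : Nat) : Int) + 10 * pvD (n + 1) (p + 1) (m / 10) := by
            rw [e1, e3]
            show _ = _ + 10 * (pvg (p + 1 + (n : Int)) (((m / 10) / 10 ^ n : Nat) : Int)
              * (10 : Int) ^ n + pvD n (p + 1) ((m / 10) % 10 ^ n))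
            rw [e2]
            have : p + ((n : Nat) + 1 : Nat) = p + 1 + (n : Int) := by push_cast; ring
            rw [this]
            ring

-- B's loop computes pvD and the digit count in one pass
lemma pvLoopB_eq : ∀ (fuel : Nat) (m : Nat) (result place p n : Int),
    pvDigits m ≤ fuel →
    pvLoopB fuel (m : Int) result place p n
      = (result + place * pvD (pvDigits m) p m, n + (pvDigits m : Int)) := by
  intro fuel
  induction fuel with
  | zero => intro m _ _ _ _ h; exact absurd h (by have := pvDigits_pos m; omega)
  | succ fuel ih =>
    intro m result place p n h
    simp only [pvLoopB, pv_md10, pv_fd10]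
    by_cases hm : m < 10
    · have h0 : m / 10 = 0 := Nat.div_eq_of_lt hm
      rw [h0]
      simp only [Nat.cast_zero, if_true]
      rw [pvDigits_small hm]
      have : (if PySem.Int.mod p 2 = 1 then PySem.Int.mod (((m % 10 : Nat) : Int) + 1) 10
              else PySem.Int.mod (((m % 10 : Nat) : Int) - 1) 10) = pvg p ((m % 10 : Nat) : Int) := rfl
      rw [this, Nat.mod_eq_of_lt hm]
      have : pvD 1 p m = pvg p (m : Int) := by
        simp [pvD]
      rw [this]
      simp only [Prod.mk.injEq]
      constructor <;> (push_cast; ring)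
    · have hge := Nat.not_lt.1 hm
      have hne : ((m / 10 : Nat) : Int) ≠ 0 := by
        have : 1 ≤ m / 10 := (Nat.le_div_iff_mul_le (by norm_num)).2 (by omega)
        exact_mod_cast by omega
      rw [if_neg hne]
      have hd := pvDigits_large hge
      have hfuel : pvDigits (m / 10) ≤ fuel := by omega
      rw [ih (m / 10) _ _ _ _ hfuel]
      have hpeel : pvD (pvDigits m) p m
          = pvg p ((m % 10 : Nat) : Int) + 10 * pvD (pvDigits (m / 10)) (p + 1) (m / 10) := by
        rw [hd]
        exact pvD_peel _ p m (by rw [← hd]; exact pvDigits_lt m)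
      have hfinal : (if PySem.Int.mod p 2 = 1 then PySem.Int.mod (((m % 10 : Nat) : Int) + 1) 10
              else PySem.Int.mod (((m % 10 : Nat) : Int) - 1) 10) = pvg p ((m % 10 : Nat) : Int) := rfl
      rw [hfinal, hpeel, hd]
      simp only [Prod.mk.injEq]
      constructor <;> (push_cast; ring)

-- A's digit-count loop: shifting one factor of 10 from the divisor to the dividend
lemma pvCountLoop_shift : ∀ (fuel : Nat) (m c : Nat) (cif : Int), 0 < c →
    pvCountLoop fuel (m : Int) ((10 * c : Nat) : Int) cif
      = pvCountLoop fuel ((m / 10 : Nat) : Int) ((c : Nat) : Int) cif := by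
  intro fuel
  induction fuel with
  | zero => intro m c cif _; rfl
  | succ fuel ih =>
    intro m c cif hc
    simp only [pvCountLoop, PySem.Int.floordiv_natCast]
    have e : m / (10 * c) = (m / 10) / c := (Nat.div_div_eq_div_mul m 10 c).symm
    rw [e]
    split
    · rw [show ((10 * c : Nat) : Int) * 10 = ((10 * (c * 10) : Nat) : Int) by push_cast; ring,
          show ((c : Nat) : Int) * 10 = ((c * 10 : Nat) : Int) by push_cast; ring]
      exact ih m (c * 10) (cif + 1) (by omega)
    · rfl

lemma pvCountLoop_eq : ∀ (fuel : Nat) (m : Nat) (cif : Int), m < 10 ^ fuel →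
    pvCountLoop fuel (m : Int) 10 cif = cif + (pvDigits m : Int) - 1 := by
  intro fuel
  induction fuel with
  | zero =>
    intro m cif h
    have : m = 0 := by simpa using h
    subst this
    rw [pvDigits_small (by norm_num)]
    simp [pvCountLoop]
  | succ fuel ih =>
    intro m cif h
    have h10 : (10 : Int) = ((10 : Nat) : Int) := by norm_num
    simp only [pvCountLoop, h10, PySem.Int.floordiv_natCast]
    by_cases hm : m < 10
    · rw [if_neg (by simp [Nat.div_eq_of_lt hm])]
      rw [pvDigits_small hm]
      push_cast; ring
    · rw [if_pos (by
        have : 1 ≤ m / 10 := (Nat.le_div_iff_mul_le (by norm_num)).2 (by omega)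
        exact_mod_cast by omega)]
      rw [show ((10 : Nat) : Int) * ((10 : Nat) : Int) = ((10 * 10 : Nat) : Int) by push_cast]
      rw [pvCountLoop_shift fuel m 10 (cif + 1) (by norm_num)]
      have hdiv : m / 10 < 10 ^ fuel := by
        rw [Nat.div_lt_iff_lt_mul (by norm_num : 0 < 10)]
        calc m < 10 ^ (fuel + 1) := h
        _ = 10 ^ fuel * 10 := by ring
      rw [show ((10 : Nat) : Int) = (10 : Int) by norm_num]
      rw [ih (m / 10) (cif + 1) hdiv]
      rw [pvDigits_large (Nat.not_lt.1 hm)]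
      push_cast; ring

-- the body of A's encoding loop, as a function of the slot count q and the 0-based index k
def pvBodyA (q : Nat) (st : Int × Int) (k : Nat) : Int × Int :=
  let cifra := PySem.Int.floordiv st.1 ((10 : Int) ^ ((q : Int) - (1 + (k : Int))).toNat)
  let final := if PySem.Int.mod ((q : Int) - (1 + (k : Int)) + 1) 2 = 0
               then PySem.Int.mod (cifra - 1) 10
               else PySem.Int.mod (cifra + 1) 10
  (PySem.Int.mod st.1 ((10 : Int) ^ ((q : Int) - (1 + (k : Int))).toNat),
   st.2 + final * (10 : Int) ^ ((q : Int) - (1 + (k : Int))).toNat)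

lemma pvBodyA_succ (q : Nat) (st : Int × Int) (k : Nat) :
    pvBodyA (q + 1) st (k + 1) = pvBodyA q st k := by
  unfold pvBodyA
  have h : ((q + 1 : Nat) : Int) - (1 + ((k + 1 : Nat) : Int)) = (q : Int) - (1 + (k : Int)) := by
    push_cast; ring
  rw [h]

lemma pvFoldA : ∀ (q : Nat) (m : Nat) (acc : Int), m < 10 ^ q →
    (List.range q).foldl (pvBodyA q) ((m : Int), acc)
      = (if q = 0 then (m : Int) else 0, acc + pvD q 1 m) := by
  intro q
  induction q with
  | zero => intro m acc _; simp [pvD]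
  | succ q ih =>
    intro m acc h
    rw [List.range_succ_eq_map, List.foldl_cons, List.foldl_map]
    have hbody : (fun (st : Int × Int) (k : Nat) => pvBodyA (q + 1) st (Nat.succ k))
        = pvBodyA q := by
      funext st k
      exact pvBodyA_succ q st k
    rw [hbody]
    have hstep : pvBodyA (q + 1) ((m : Int), acc) 0
        = (((m % 10 ^ q : Nat) : Int), acc + pvg (1 + (q : Int)) ((m / 10 ^ q : Nat) : Int) * (10 : Int) ^ q) := by
      unfold pvBodyA
      have he : (((q + 1 : Nat) : Int) - (1 + ((0 : Nat) : Int))).toNat = q := by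
        push_cast; omega
      have hp : ((q + 1 : Nat) : Int) - (1 + ((0 : Nat) : Int)) + 1 = 1 + (q : Int) := by
        push_cast; ring
      rw [he, hp]
      simp only [pv_fd, pv_md]
      rw [pvg_eq]
    rw [hstep]
    have hlt : m % 10 ^ q < 10 ^ q := Nat.mod_lt _ (by positivity)
    rw [ih (m % 10 ^ q) _ hlt]
    have hfst : (if q = 0 then ((m % 10 ^ q : Nat) : Int) else (0 : Int)) = 0 := by
      split
      · next hq => subst hq; simp
      · rfl
    rw [hfst]
    have hsnd : acc + pvg (1 + (q : Int)) ((m / 10 ^ q : Nat) : Int) * (10 : Int) ^ q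
        + pvD q 1 (m % 10 ^ q) = acc + pvD (q + 1) 1 m := by
      show _ = acc + (pvg (1 + (q : Int)) ((m / 10 ^ q : Nat) : Int) * (10 : Int) ^ q
        + pvD q 1 (m % 10 ^ q))
      ring
    simp only [if_neg (Nat.succ_ne_zero q)]
    rw [← hsnd]

-- ===== VERDICT (by name: the statement is the Claim_ definition above) =====
theorem cod_impares_spec : Claim_equal_cod_impares := by
  unfold Claim_equal_cod_impares
  intro arg hdom hpre
  unfold Spec_cod_impares
  obtain ⟨m, rfl⟩ : ∃ m : Nat, arg = (m : Int) := ⟨arg.toNat, (Int.toNat_of_nonneg hpre).symm⟩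
  have hm31 : m ≤ 2147483648 := by
    unfold Dom_cod_impares pvDomInt at hdom
    simp only [decide_eq_true_eq] at hdom
    exact_mod_cast hdom.2
  have hm10 : m < 10 ^ 10 := by
    have : (10 : Nat) ^ 10 = 10000000000 := by norm_num
    omega
  have hq10 : pvDigits m ≤ 10 := pvDigits_le 9 m hm10
  have hm64 : m < 10 ^ 64 := lt_of_lt_of_le hm10 (Nat.pow_le_pow_right (by norm_num) (by norm_num))
  have hcnt : pvCountLoop 64 (m : Int) 10 1 = (pvDigits m : Int) := by
    rw [pvCountLoop_eq 64 m 1 hm64]; ring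
  -- A's side
  show cod_impares (m : Int) = cod_impares_alt (m : Int)
  unfold cod_impares cod_impares_alt
  simp only [hcnt]
  rw [PySem.List.pyRange_one]
  have hr : ((pvDigits m : Int) + 1 - 1).toNat = pvDigits m := by omega
  rw [hr, List.foldl_map]
  rw [show (fun (st : Int × Int) (k : Nat) =>
        (PySem.Int.mod st.1 ((10 : Int) ^ ((pvDigits m : Int) - (1 + (k : Int))).toNat),
         st.2 + (if PySem.Int.mod ((pvDigits m : Int) - (1 + (k : Int)) + 1) 2 = 0
                 then PySem.Int.mod (PySem.Int.floordiv st.1 ((10 : Int) ^ ((pvDigits m : Int) - (1 + (k : Int))).toNat) - 1) 10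
                 else PySem.Int.mod (PySem.Int.floordiv st.1 ((10 : Int) ^ ((pvDigits m : Int) - (1 + (k : Int))).toNat) + 1) 10)
               * (10 : Int) ^ ((pvDigits m : Int) - (1 + (k : Int))).toNat))
      = pvBodyA (pvDigits m) from rfl]
  rw [pvFoldA (pvDigits m) m 0 (pvDigits_lt m)]
  rw [pvLoopB_eq 64 m 0 1 1 0 (by omega)]
  push_cast
  ring
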